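-- pv_equiv track=rewrite | github.com/YSCJRH/create-double-skill | scripts/knowledge_base.py | double_index
-- ===== SOURCE A (Python) =====
-- from collections import Counter
-- from typing import Any
--
-- def count_records(records: list[dict[str, Any]]) -> dict[str, int]:
--     return dict(sorted(Counter(str(record["metadata"].get("source_kind", "unknown")) for record in records).items()))
--
-- def double_index(profile: dict[str, Any], records: list[dict[str, Any]]) -> str:
--     counts = count_records(records)
--     lines = [
--         f"# {profile.get('meta', {}).get('display_name', 'Double')} Knowledge Base",
--         "",
--         "## Core Pages",
--         "- [Overview](wiki/overview.md)",
--         "- [Values and Priorities](wiki/values-and-priorities.md)",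
--         "- [Decision Patterns](wiki/decision-patterns.md)",
--         "- [Boundaries](wiki/boundaries.md)",
--         "- [Voice and Phrasing](wiki/voice-and-phrasing.md)",
--         "- [Anchor Examples](wiki/anchor-examples.md)",
--         "- [Open Questions](wiki/open-questions.md)",
--         "",
--         "## Raw Event Summary",
--         f"- total records: {len(records)}",
--     ]
--     for kind, count in counts.items():
--         lines.append(f"- {kind}: {count}")
--     return "\n".join(lines)
-- ===== SOURCE B (Python) =====
-- def double_index(profile, records):
--     name = profile.get("meta", {}).get("display_name", "Double")
--     out = (
--         "# " + name + " Knowledge Base\n"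
--         "\n"
--         "## Core Pages\n"
--         "- [Overview](wiki/overview.md)\n"
--         "- [Values and Priorities](wiki/values-and-priorities.md)\n"
--         "- [Decision Patterns](wiki/decision-patterns.md)\n"
--         "- [Boundaries](wiki/boundaries.md)\n"
--         "- [Voice and Phrasing](wiki/voice-and-phrasing.md)\n"
--         "- [Anchor Examples](wiki/anchor-examples.md)\n"
--         "- [Open Questions](wiki/open-questions.md)\n"
--         "\n"
--         "## Raw Event Summary\n"
--         "- total records: " + str(len(records))
--     )
--     keys = sorted(str(r["metadata"].get("source_kind", "unknown")) for r in records)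
--     i = 0
--     while i < len(keys):
--         j = i + 1
--         while j < len(keys) and keys[j] == keys[i]:
--             j += 1
--         out += "\n- " + keys[i] + ": " + str(j - i)
--         i = j
--     return out
-- ===== Notes on version B (the rewrite author's own statement) =====
-- stated objective: alternative
-- what changed: Replaced Counter-hashmap-then-sort-items-then-join-a-list-of-lines with sort-the-keys-then-two-pointer-run-scan that appends each count line directly onto one pre-built header string: no Counter, no dict, no list of lines, no join.
import Mathlib
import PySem

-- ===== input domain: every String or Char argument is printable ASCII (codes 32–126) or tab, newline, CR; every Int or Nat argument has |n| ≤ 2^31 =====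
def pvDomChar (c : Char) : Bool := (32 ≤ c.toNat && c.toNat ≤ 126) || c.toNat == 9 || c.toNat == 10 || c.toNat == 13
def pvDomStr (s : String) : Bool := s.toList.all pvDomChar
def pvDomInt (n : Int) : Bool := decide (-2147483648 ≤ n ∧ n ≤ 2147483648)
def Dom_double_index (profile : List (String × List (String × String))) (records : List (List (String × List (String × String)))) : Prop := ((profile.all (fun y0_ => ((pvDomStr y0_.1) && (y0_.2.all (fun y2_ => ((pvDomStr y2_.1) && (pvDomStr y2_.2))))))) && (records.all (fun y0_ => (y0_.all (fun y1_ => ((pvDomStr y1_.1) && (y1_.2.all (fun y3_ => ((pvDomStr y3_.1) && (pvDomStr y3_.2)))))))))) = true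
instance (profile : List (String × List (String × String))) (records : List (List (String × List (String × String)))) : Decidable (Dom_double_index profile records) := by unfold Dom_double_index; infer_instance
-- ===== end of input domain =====

-- B drops A's Counter-hashmap-then-sort-then-join-a-list-of-lines entirely: it sorts the keys, scans
-- equal runs with two pointers, and appends each count line directly onto one pre-built header string.

-- ===== PORT A =====
-- str(record["metadata"].get("source_kind", "unknown")); values are strings, so str() is the identity.
-- record["metadata"] raises KeyError when the key is missing — excluded by Pre_ below.
def pvAKind (r : List (String × List (String × String))) : String :=
  PySem.Dict.getD (PySem.Dict.mk (PySem.Dict.getD (PySem.Dict.mk r) "metadata" [])) "source_kind" "unknown"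

def double_index (profile : List (String × List (String × String))) (records : List (List (String × List (String × String)))) : String :=
  -- counts = dict(sorted(Counter(...).items())) ; sorted on pairs = tuple-key sort (sorted2)
  let counts := PySem.Dict.ofList (PySem.List.sorted2 (PySem.Dict.counter (records.map pvAKind)).items (fun p => p.1) (fun p => p.2))
  let lines : List String := [
    "# " ++ PySem.Dict.getD (PySem.Dict.mk (PySem.Dict.getD (PySem.Dict.mk profile) "meta" [])) "display_name" "Double" ++ " Knowledge Base",
    "",
    "## Core Pages",
    "- [Overview](wiki/overview.md)",
    "- [Values and Priorities](wiki/values-and-priorities.md)",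
    "- [Decision Patterns](wiki/decision-patterns.md)",
    "- [Boundaries](wiki/boundaries.md)",
    "- [Voice and Phrasing](wiki/voice-and-phrasing.md)",
    "- [Anchor Examples](wiki/anchor-examples.md)",
    "- [Open Questions](wiki/open-questions.md)",
    "",
    "## Raw Event Summary",
    "- total records: " ++ PySem.Int.toStr (records.length : Int)]
  let lines := counts.items.foldl (fun ls p => ls ++ ["- " ++ p.1 ++ ": " ++ PySem.Int.toStr p.2]) lines
  PySem.Str.join "\n" lines

-- ===== PORT B =====
def pvBKind (r : List (String × List (String × String))) : String :=
  PySem.Dict.getD (PySem.Dict.mk (PySem.Dict.getD (PySem.Dict.mk r) "metadata" [])) "source_kind" "unknown"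

-- Source B's while loop: the run of keys equal to the head is keys[i+1:j]; its line is appended to out.
def pvEmit : List String → String → String
  | [], out => out
  | k :: rest, out =>
      pvEmit (rest.dropWhile (fun x => x == k))
        (out ++ "\n- " ++ k ++ ": " ++ PySem.Int.toStr (1 + (rest.takeWhile (fun x => x == k)).length : Int))
termination_by zs _ => zs.length
decreasing_by
  simpa using Nat.lt_succ_of_le (List.length_dropWhile_le _ _)

def double_index_alt (profile : List (String × List (String × String))) (records : List (List (String × List (String × String)))) : String :=
  let name := PySem.Dict.getD (PySem.Dict.mk (PySem.Dict.getD (PySem.Dict.mk profile) "meta" [])) "display_name" "Double"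
  let out :=
    "# " ++ name ++ " Knowledge Base\n\n## Core Pages\n- [Overview](wiki/overview.md)\n- [Values and Priorities](wiki/values-and-priorities.md)\n- [Decision Patterns](wiki/decision-patterns.md)\n- [Boundaries](wiki/boundaries.md)\n- [Voice and Phrasing](wiki/voice-and-phrasing.md)\n- [Anchor Examples](wiki/anchor-examples.md)\n- [Open Questions](wiki/open-questions.md)\n\n## Raw Event Summary\n- total records: "
      ++ PySem.Int.toStr (records.length : Int)
  pvEmit (PySem.List.sorted (records.map pvBKind) (fun x => x) false) out

-- ===== PRECONDITION & SPEC =====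
-- Pre_ excludes exactly the records without a "metadata" key, on which A's record["metadata"] raises KeyError.
def Pre_double_index (profile : List (String × List (String × String))) (records : List (List (String × List (String × String)))) : Prop :=
  ∀ r ∈ records, "metadata" ∈ r.map Prod.fst
instance (profile : List (String × List (String × String))) (records : List (List (String × List (String × String)))) : Decidable (Pre_double_index profile records) := by unfold Pre_double_index; infer_instance
def pvWitness_double_index : (List (String × List (String × String))) × (List (List (String × List (String × String)))) :=
  ([("meta", [("display_name", "X")])], [[("metadata", [("source_kind", "a")])], [("metadata", [])], [("metadata", [("source_kind", "a")])]])
def Spec_double_index (profile : List (String × List (String × String))) (records : List (List (String × List (String × String)))) (out : String) : Prop := out = double_index_alt profile records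
instance (profile : List (String × List (String × String))) (records : List (List (String × List (String × String)))) (out : String) : Decidable (Spec_double_index profile records out) := by unfold Spec_double_index; infer_instance

-- ===== CLAIM (what is proved, stated in full; the proofs are below) =====
def Claim_equal_double_index : Prop := ∀ (profile : List (String × List (String × String))) (records : List (List (String × List (String × String)))), Dom_double_index profile records → Pre_double_index profile records → Spec_double_index profile records (double_index profile records)

-- ===== LEMMAS AND PROOFS =====

theorem pvBKind_eq_aKind : pvBKind = pvAKind := rfl

-- proof-only mirror of Source B's run scan as a list of (key, count) pairs
def pvGroupRuns : List String → List (String × Int)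
  | [] => []
  | k :: rest =>
    (k, (1 + (rest.takeWhile (fun x => x == k)).length : Int)) :: pvGroupRuns (rest.dropWhile (fun x => x == k))
termination_by zs => zs.length
decreasing_by
  simpa using Nat.lt_succ_of_le (List.length_dropWhile_le _ _)

-- insertBy only compares the inserted element with members of the list
theorem pv_insertBy_congr {α : Type} (b b' : α → α → Bool) (x : α) :
    ∀ (ys : List α), (∀ y ∈ ys, b x y = b' x y) →
    PySem.List.insertBy b x ys = PySem.List.insertBy b' x ys := by
  intro ys
  induction ys with
  | nil => intro _; rfl
  | cons y ys ih =>
    intro h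
    simp only [PySem.List.insertBy]
    rw [h y (by simp)]
    by_cases hb : b' x y = true
    · simp [hb]
    · simp only [Bool.not_eq_true] at hb
      simp [hb, ih (fun z hz => h z (by simp [hz]))]

theorem pv_foldl_insertBy_congr {α : Type} (b b' : α → α → Bool) :
    ∀ (l acc : List α), (∀ x y, (x ∈ l ∨ x ∈ acc) → (y ∈ l ∨ y ∈ acc) → b x y = b' x y) →
    l.foldl (fun acc x => PySem.List.insertBy b x acc) acc
      = l.foldl (fun acc x => PySem.List.insertBy b' x acc) acc := by
  intro l
  induction l with
  | nil => intro _ _; rfl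
  | cons x l ih =>
    intro acc h
    simp only [List.foldl_cons]
    rw [pv_insertBy_congr b b' x acc (fun y hy => h x y (by simp) (by simp [hy]))]
    apply ih
    intro z w hz hw
    apply h
    · rcases hz with hz | hz
      · exact Or.inl (by simp [hz])
      · rcases (PySem.List.mem_insertBy _ _ _ _).1 hz with h1 | h1
        · exact Or.inl (by simp [h1])
        · exact Or.inr h1
    · rcases hw with hw | hw
      · exact Or.inl (by simp [hw])
      · rcases (PySem.List.mem_insertBy _ _ _ _).1 hw with h1 | h1
        · exact Or.inl (by simp [h1])
        · exact Or.inr h1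

-- on pairs whose first components identify them, the tuple-key sort is the fst-key sort
theorem pv_sorted2_eq_sorted_fst (l : List (String × Int)) (hnd : (l.map Prod.fst).Nodup) :
    PySem.List.sorted2 l (fun p => p.1) (fun p => p.2) false = PySem.List.sorted l (fun p => p.1) false := by
  have hinj : ∀ a ∈ l, ∀ c ∈ l, a.1 = c.1 → a = c := List.inj_on_of_nodup_map hnd
  simp only [PySem.List.sorted2, PySem.List.sorted, if_neg (by decide : ¬ (false = true))]
  apply pv_foldl_insertBy_congr
  intro a c ha hc
  simp only [List.not_mem_nil, or_false] at ha hc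
  by_cases h1 : a.1 < c.1
  · simp [h1]
  · by_cases h2 : c.1 < a.1
    · simp [h1, h2]
    · have : a.1 = c.1 := le_antisymm (not_lt.1 h2) (not_lt.1 h1)
      have : a = c := hinj a ha c hc this
      subst this
      simp

-- a run of copies of k followed by a k-free tail dedups to k :: dedup(tail)
theorem pv_discard_of_not_mem (s : PySem.Set String) (k : String) (h : k ∉ s) :
    PySem.Set.discard s k = s := by
  simp only [PySem.Set.discard]
  apply List.filter_eq_self.2
  intro y hy
  have : y ≠ k := fun h' => h (h' ▸ hy)
  simpa using this

theorem pv_ofList_run (k : String) :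
    ∀ (run rest' : List String), (∀ x ∈ run, x = k) → k ∉ rest' →
    PySem.Set.ofList (k :: (run ++ rest')) = k :: PySem.Set.ofList rest' := by
  intro run
  induction run with
  | nil =>
    intro rest' _ hk
    rw [List.nil_append, PySem.Set.ofList_cons]
    rw [pv_discard_of_not_mem _ k (fun h => hk ((PySem.Set.mem_ofList rest' k).1 h))]
  | cons x run ih =>
    intro rest' hall hk
    have hx : x = k := hall x (by simp)
    subst hx
    have h1 : PySem.Set.ofList (x :: (run ++ rest')) = x :: PySem.Set.ofList rest' :=
      ih rest' (fun z hz => hall z (by simp [hz])) hk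
    rw [List.cons_append, PySem.Set.ofList_cons]
    congr 1
    rw [h1]
    simp only [PySem.Set.discard, List.filter_cons]
    simp only [BEq.rfl]
    exact pv_discard_of_not_mem _ x (fun h => hk ((PySem.Set.mem_ofList rest' x).1 h))

-- dedup of a ≤-sorted list is <-sorted
theorem pv_ofList_pairwise_lt :
    ∀ (zs : List String), zs.Pairwise (· ≤ ·) → (PySem.Set.ofList zs).Pairwise (· < ·) := by
  intro zs
  induction zs with
  | nil => intro _; simp [PySem.Set.ofList]
  | cons x t ih =>
    intro hp
    rw [PySem.Set.ofList_cons]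
    rw [List.pairwise_cons] at hp ⊢
    constructor
    · intro y hy
      simp only [PySem.Set.discard, List.mem_filter] at hy
      obtain ⟨hy1, hy2⟩ := hy
      have hy2' : y ≠ x := by simpa using hy2
      exact lt_of_le_of_ne (hp.1 y ((PySem.Set.mem_ofList t y).1 hy1)) hy2'.symm
    · simp only [PySem.Set.discard]
      exact List.Pairwise.sublist List.filter_sublist (ih hp.2)

theorem pv_not_mem_dropWhile (k : String) (rest : List String)
    (hkle : ∀ y ∈ rest, k ≤ y) (hrp : rest.Pairwise (· ≤ ·)) :
    k ∉ rest.dropWhile (fun x => x == k) := by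
  intro hmem
  cases hd : rest.dropWhile (fun x => x == k) with
  | nil => rw [hd] at hmem; simp at hmem
  | cons h t =>
    rw [hd] at hmem
    have hhk : h ≠ k := by
      have := List.head?_dropWhile_not (fun x => x == k) rest
      rw [hd] at this
      simpa using this
    have hrp' : (h :: t).Pairwise (· ≤ ·) :=
      hd ▸ List.Pairwise.sublist (List.dropWhile_sublist _) hrp
    rcases List.mem_cons.1 hmem with h1 | h1
    · exact hhk h1.symm
    · have hle1 : h ≤ k := (List.pairwise_cons.1 hrp').1 k h1
      have hhr : h ∈ rest := (List.dropWhile_sublist _).subset (by rw [hd]; simp)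
      exact hhk (le_antisymm hle1 (hkle h hhr))

theorem pv_groupRuns_sorted :
    ∀ (zs : List String), zs.Pairwise (· ≤ ·) →
    pvGroupRuns zs = (PySem.Set.ofList zs).map (fun k => (k, (zs.count k : Int))) := by
  intro zs
  induction zs using pvGroupRuns.induct with
  | case1 => intro _; simp [pvGroupRuns, PySem.Set.ofList]
  | case2 k rest ih =>
    intro hp
    set run := rest.takeWhile (fun x => x == k) with hrun
    set rest' := rest.dropWhile (fun x => x == k) with hrest'
    have hsplit : run ++ rest' = rest := List.takeWhile_append_dropWhile
    have hallrun : ∀ x ∈ run, x = k := by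
      intro x hx
      have := List.mem_takeWhile_imp hx
      simpa using this
    have hkle : ∀ y ∈ rest, k ≤ y := (List.pairwise_cons.1 hp).1
    have hrp : rest.Pairwise (· ≤ ·) := (List.pairwise_cons.1 hp).2
    have hrp' : rest'.Pairwise (· ≤ ·) := List.Pairwise.sublist (List.dropWhile_sublist _) hrp
    have hknot : k ∉ rest' := pv_not_mem_dropWhile k rest hkle hrp
    have hof : PySem.Set.ofList (k :: rest) = k :: PySem.Set.ofList rest' := by
      rw [← hsplit]; exact pv_ofList_run k run rest' hallrun hknot
    have hcountk : (k :: rest).count k = 1 + run.length := by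
      rw [← hsplit]
      simp [List.count_append, List.count_eq_zero.2 hknot,
        List.count_eq_length.2 (fun b hb => (hallrun b hb).symm), Nat.add_comm]
    rw [pvGroupRuns]
    rw [hof, List.map_cons]
    congr 1
    · simp only [hcountk]
      push_cast
      ring_nf
      rw [← hrun]
    · rw [ih hrp']
      apply List.map_congr_left
      intro m hm
      have hm' : m ∈ rest' := (PySem.Set.mem_ofList rest' m).1 hm
      have hmk : m ≠ k := fun h => hknot (h ▸ hm')
      have : (k :: rest).count m = rest'.count m := by
        rw [← hsplit]
        have hrun0 : run.count m = 0 := List.count_eq_zero.2 (fun h => hmk (hallrun m h))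
        simp [List.count_append, hrun0, Ne.symm hmk]
      simp [this]

-- foldl-append of one rendered line per pair is init ++ map
theorem pv_foldl_append_map {α : Type} (g : α → String) :
    ∀ (L : List α) (init : List String),
    L.foldl (fun ls p => ls ++ [g p]) init = init ++ L.map g := by
  intro L
  induction L with
  | nil => intro init; simp
  | cons p L ih => intro init; simp [ih]

-- the central identity: A's dict items = the run groups of the sorted key list
theorem pv_items_eq_groups (keys : List String) :
    (PySem.Dict.ofList (PySem.List.sorted2 (PySem.Dict.counter keys).items (fun p => p.1) (fun p => p.2))).items
      = pvGroupRuns (PySem.List.sorted keys (fun x => x) false) := by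
  set f : String → String × Int := fun k => (k, (keys.count k : Int)) with hf
  have hitems : (PySem.Dict.counter keys).items = (PySem.Set.ofList keys).map f :=
    PySem.Dict.items_counter keys
  have hndk : ((PySem.Dict.counter keys).items.map Prod.fst).Nodup := by
    rw [hitems, List.map_map]
    have hcomp : (Prod.fst ∘ f) = id := rfl
    rw [hcomp, List.map_id]
    exact PySem.Set.nodup_ofList keys
  have hA1 := pv_sorted2_eq_sorted_fst (PySem.Dict.counter keys).items hndk
  have hA2 : PySem.List.sorted (PySem.Dict.counter keys).items (fun p => p.1) false
      = (PySem.List.sorted (PySem.Set.ofList keys) (fun x => x) false).map f := by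
    apply PySem.List.sorted_eq_of_perm_of_pairwise_lt
    · rw [hitems]
      exact (PySem.List.sorted_perm (PySem.Set.ofList keys) (fun x => x) false).map f
    · rw [List.pairwise_map]
      exact PySem.List.sorted_ofList_pairwise_lt keys
  set S := PySem.List.sorted2 (PySem.Dict.counter keys).items (fun p => p.1) (fun p => p.2) false with hS
  have hSnd : (S.map Prod.fst).Nodup := by
    have hperm : S.Perm (PySem.Dict.counter keys).items := PySem.List.sorted2_perm _ _ _ _
    exact ((hperm.map Prod.fst).nodup_iff).2 hndk
  have hDict : (PySem.Dict.ofList S).items = S := by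
    have := PySem.Dict.items_foldl_insert_fresh S (fun p => p.1) (fun p => p.2) PySem.Dict.empty
      (fun a _ => PySem.Dict.contains_empty _) hSnd
    simpa [PySem.Dict.ofList, PySem.Dict.update] using this
  set zs := PySem.List.sorted keys (fun x => x) false with hzs
  have hzp : zs.Pairwise (· ≤ ·) := by
    simpa using PySem.List.sorted_pairwise keys (fun x => x)
  have hB1 := pv_groupRuns_sorted zs hzp
  have hB2 : PySem.Set.ofList zs = PySem.List.sorted (PySem.Set.ofList keys) (fun x => x) false := by
    symm
    apply PySem.List.sorted_eq_of_perm_of_pairwise_lt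
    · apply (List.perm_ext_iff_of_nodup (PySem.Set.nodup_ofList zs) (PySem.Set.nodup_ofList keys)).2
      intro a
      rw [PySem.Set.mem_ofList, PySem.Set.mem_ofList, hzs, PySem.List.mem_sorted]
    · exact pv_ofList_pairwise_lt zs hzp
  have hcnt : ∀ m, zs.count m = keys.count m := fun m =>
    (PySem.List.sorted_perm keys (fun x => x) false).count_eq m
  rw [hDict, hA1, hA2, hB1, hB2]
  apply List.map_congr_left
  intro m _
  simp [hf, hcnt m]

-- pvEmit is the foldl of one rendered line per run group
theorem pv_emit_eq_foldl :
    ∀ (zs : List String) (out : String),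
    pvEmit zs out = (pvGroupRuns zs).foldl (fun s p => s ++ "\n- " ++ p.1 ++ ": " ++ PySem.Int.toStr p.2) out := by
  intro zs
  induction zs using pvGroupRuns.induct with
  | case1 => intro out; simp [pvEmit, pvGroupRuns]
  | case2 k rest ih => intro out; rw [pvEmit, pvGroupRuns, List.foldl_cons, ih]

-- appending one more part to a nonempty join inserts one separator
theorem pv_join_snoc (x : String) :
    ∀ (init : List String) (a : String),
    PySem.Str.join "\n" (x :: init ++ [a]) = PySem.Str.join "\n" (x :: init) ++ "\n" ++ a := by
  intro init
  induction init generalizing x with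
  | nil =>
    intro a
    apply String.toList_inj.1
    simp [PySem.Str.toList_join, PySem.Chars.join, List.intercalate]
  | cons y t ih =>
    intro a
    apply String.toList_inj.1
    have h1 := congrArg String.toList (ih y a)
    simp only [PySem.Str.toList_join, String.toList_append, List.map_cons, List.map_append,
      List.cons_append] at h1 ⊢
    rw [PySem.Chars.join_cons_cons, PySem.Chars.join_cons_cons (p := x.toList) (q := y.toList)
      (rest := List.map String.toList t), h1]
    simp [List.append_assoc]

-- join of header lines ++ rendered pairs = foldl of B's append step over the pairs
theorem pv_join_append_foldl (x : String) :
    ∀ (L : List (String × Int)) (init : List String),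
    PySem.Str.join "\n" (x :: init ++ L.map (fun p => "- " ++ p.1 ++ ": " ++ PySem.Int.toStr p.2))
      = L.foldl (fun s p => s ++ "\n- " ++ p.1 ++ ": " ++ PySem.Int.toStr p.2) (PySem.Str.join "\n" (x :: init)) := by
  intro L
  induction L with
  | nil => intro init; simp
  | cons p L ih =>
    intro init
    have hstep : ∀ (s : String),
        s ++ "\n" ++ ("- " ++ p.1 ++ ": " ++ PySem.Int.toStr p.2)
          = s ++ "\n- " ++ p.1 ++ ": " ++ PySem.Int.toStr p.2 := by
      intro s
      apply String.toList_inj.1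
      simp
    calc PySem.Str.join "\n" (x :: init ++ (p :: L).map (fun q => "- " ++ q.1 ++ ": " ++ PySem.Int.toStr q.2))
        = PySem.Str.join "\n" (x :: (init ++ ["- " ++ p.1 ++ ": " ++ PySem.Int.toStr p.2]) ++ L.map (fun q => "- " ++ q.1 ++ ": " ++ PySem.Int.toStr q.2)) := by
          simp
      _ = L.foldl (fun s q => s ++ "\n- " ++ q.1 ++ ": " ++ PySem.Int.toStr q.2) (PySem.Str.join "\n" (x :: (init ++ ["- " ++ p.1 ++ ": " ++ PySem.Int.toStr p.2]))) := ih _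
      _ = _ := by
          rw [List.foldl_cons, ← List.cons_append, pv_join_snoc, hstep]

-- the 13 header lines joined with "\n" are B's single header string
set_option maxRecDepth 8000 in
theorem pv_header_eq (name nstr : String) :
    PySem.Str.join "\n" ["# " ++ name ++ " Knowledge Base", "", "## Core Pages",
      "- [Overview](wiki/overview.md)", "- [Values and Priorities](wiki/values-and-priorities.md)",
      "- [Decision Patterns](wiki/decision-patterns.md)", "- [Boundaries](wiki/boundaries.md)",
      "- [Voice and Phrasing](wiki/voice-and-phrasing.md)", "- [Anchor Examples](wiki/anchor-examples.md)",
      "- [Open Questions](wiki/open-questions.md)", "", "## Raw Event Summary", "- total records: " ++ nstr]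
    = "# " ++ name ++ " Knowledge Base\n\n## Core Pages\n- [Overview](wiki/overview.md)\n- [Values and Priorities](wiki/values-and-priorities.md)\n- [Decision Patterns](wiki/decision-patterns.md)\n- [Boundaries](wiki/boundaries.md)\n- [Voice and Phrasing](wiki/voice-and-phrasing.md)\n- [Anchor Examples](wiki/anchor-examples.md)\n- [Open Questions](wiki/open-questions.md)\n\n## Raw Event Summary\n- total records: " ++ nstr := by
  apply String.toList_inj.1
  simp [PySem.Str.toList_join, PySem.Chars.join, List.intercalate]

-- ===== VERDICT (by name: the statement is the Claim_ definition above) =====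
theorem double_index_spec : Claim_equal_double_index := by
  intro profile records _ _
  show double_index profile records = double_index_alt profile records
  simp only [double_index, double_index_alt, pvBKind_eq_aKind]
  rw [pv_foldl_append_map, pv_items_eq_groups (records.map pvAKind), pv_emit_eq_foldl,
      List.cons_append, ← pv_header_eq]
  exact pv_join_append_foldl _ _ _
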